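-- pv_equiv track=rewrite | github.com/enqinghayashi/Rankd-Music_Rating_Application | app/analysis.py | compareDatasets
-- ===== SOURCE A (Python) =====
-- def compareDatasets(setA, setB):
--   output = {}
--   a_ids = list(setA.keys())
--   for id in a_ids:
--     output[id] = {
--       "x": setA[id]["score"],
--       "y": -1,
--       "difference": -1,
--     }
--
--   b_ids = list(setB.keys())
--   for id in b_ids:
--     try:
--       item = output[id]
--       item["y"] = setB[id]["score"]
--       item["difference"] = item["x"] - item["y"]
--     except KeyError:
--       output[id] = {
--         "x": -1,
--         "y": setB[id]["score"],
--         "difference": -1,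
--       }
--   return output
-- ===== SOURCE B (Python) =====
-- def compareDatasets(setA, setB):
--   merged = {**setA, **setB}
--   output = {}
--   for id in merged:
--     inA = id in setA
--     inB = id in setB
--     x = setA[id]["score"] if inA else -1
--     y = setB[id]["score"] if inB else -1
--     output[id] = {
--       "x": x,
--       "y": y,
--       "difference": x - y if inA and inB else -1,
--     }
--   return output
-- ===== Notes on version B (the rewrite author's own statement) =====
-- stated objective: simpler
-- what changed: Replaces A's two-pass build-then-patch (insert all A entries, then try/except-update or insert while walking B) with a single pass over the merged keyset {**setA, **setB} that computes each entry's final x/y/difference once; Pre_ excludes inputs where an inner dict lacks a 'score' key (both A and B raise KeyError there) and association lists with duplicate keys, which do not arise from Python dict arguments and whose first-match reading is a representation artefact.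
import Mathlib
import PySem

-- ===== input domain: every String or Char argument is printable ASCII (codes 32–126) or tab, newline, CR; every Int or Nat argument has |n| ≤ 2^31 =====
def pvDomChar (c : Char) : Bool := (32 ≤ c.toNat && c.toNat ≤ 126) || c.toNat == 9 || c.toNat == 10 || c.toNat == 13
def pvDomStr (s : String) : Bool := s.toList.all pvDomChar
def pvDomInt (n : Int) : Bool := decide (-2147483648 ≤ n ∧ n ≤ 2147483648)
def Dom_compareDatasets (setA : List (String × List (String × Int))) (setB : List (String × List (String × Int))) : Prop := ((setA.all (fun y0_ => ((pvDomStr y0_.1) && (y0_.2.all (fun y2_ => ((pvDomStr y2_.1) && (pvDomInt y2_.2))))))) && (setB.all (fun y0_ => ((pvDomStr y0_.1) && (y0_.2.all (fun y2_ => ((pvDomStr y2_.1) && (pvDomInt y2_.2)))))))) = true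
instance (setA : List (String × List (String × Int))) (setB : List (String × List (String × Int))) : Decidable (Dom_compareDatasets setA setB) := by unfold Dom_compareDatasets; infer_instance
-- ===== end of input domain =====

-- B replaces A's two-pass build-then-patch (try/except) by one pass over the merged keyset
-- {**setA, **setB}, computing each entry's final x/y/difference once (objective: simpler).

-- Shared dict primitives (both Pythons receive dicts; assoc lists model them, first-match lookup).
-- alook d k = d[k] as an Option (none = KeyError).
def alook {β : Type} : List (String × β) → String → Option β
  | [], _ => none
  | q :: t, k => if q.1 = k then some q.2 else alook t k

-- dput d k v = the dict assignment d[k] = v: overwrite in place if the key exists, else append.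
def dput {β : Type} (d : List (String × β)) (k : String) (v : β) : List (String × β) :=
  if (d.map Prod.fst).contains k then d.map (fun q => if q.1 = k then (q.1, v) else q)
  else d ++ [(k, v)]

-- inner["score"] with a default; exact wherever Pre_ guarantees the key is present.
def scoreOf (d : List (String × Int)) : Int := (alook d "score").getD (-1)

-- ===== PORT A =====
def aEntry (s : Int) : List (String × Int) := [("x", s), ("y", -1), ("difference", -1)]

-- the try-branch body: item["y"] = sB; item["difference"] = item["x"] - item["y"]
def aUpdate (item : List (String × Int)) (sB : Int) : List (String × Int) :=
  let item1 := dput item "y" sB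
  dput item1 "difference" ((alook item1 "x").getD (-1) - (alook item1 "y").getD (-1))

-- one iteration of A's second loop: try: item = output[id] … except KeyError: output[id] = {...}
-- (the in-place mutation of the shared entry object = rewriting the entry under that key)
def aStep (out : List (String × List (String × Int))) (p : String × List (String × Int)) :
    List (String × List (String × Int)) :=
  match alook out p.1 with
  | some item => out.map (fun q => if q.1 = p.1 then (q.1, aUpdate item (scoreOf p.2)) else q)
  | none => out ++ [(p.1, [("x", -1), ("y", scoreOf p.2), ("difference", -1)])]

def compareDatasets (setA : List (String × List (String × Int))) (setB : List (String × List (String × Int))) : List (String × List (String × Int)) :=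
  let out1 := setA.foldl (fun out p => dput out p.1 (aEntry (scoreOf p.2))) []
  setB.foldl aStep out1

-- ===== PORT B =====
-- the entry B computes once for a merged key
def bEntry (setA setB : List (String × List (String × Int))) (id : String) : List (String × Int) :=
  let inA := (setA.map Prod.fst).contains id
  let inB := (setB.map Prod.fst).contains id
  let x := if inA then scoreOf ((alook setA id).getD []) else -1
  let y := if inB then scoreOf ((alook setB id).getD []) else -1
  [("x", x), ("y", y), ("difference", if inA && inB then x - y else -1)]

def compareDatasets_alt (setA : List (String × List (String × Int))) (setB : List (String × List (String × Int))) : List (String × List (String × Int)) :=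
  -- merged = {**setA, **setB}
  let merged := setB.foldl (fun d p => dput d p.1 p.2) setA
  -- one pass writing output[id] once per merged key (merged keys are distinct)
  merged.map (fun p => (p.1, bEntry setA setB p.1))

-- ===== PRECONDITION & SPEC =====
-- Pre_ excludes (a) inputs where some inner dict lacks a "score" key — there the Python A (and B)
-- raises KeyError — and (b) assoc lists with duplicate keys, which do not arise from Python dict
-- arguments and on which first-match lookup vs dict last-wins collapse is a representation artefact.
def Pre_compareDatasets (setA : List (String × List (String × Int))) (setB : List (String × List (String × Int))) : Prop :=
  (setA.map Prod.fst).Nodup ∧ (setB.map Prod.fst).Nodup ∧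
  (∀ p ∈ setA, (p.2.map Prod.fst).Nodup ∧ "score" ∈ p.2.map Prod.fst) ∧
  (∀ p ∈ setB, (p.2.map Prod.fst).Nodup ∧ "score" ∈ p.2.map Prod.fst)
instance (setA : List (String × List (String × Int))) (setB : List (String × List (String × Int))) : Decidable (Pre_compareDatasets setA setB) := by unfold Pre_compareDatasets; infer_instance

def pvWitness_compareDatasets : (List (String × List (String × Int))) × (List (String × List (String × Int))) :=
  ([("a", [("score", 3)]), ("c", [("score", 7)])], [("b", [("score", 5)]), ("a", [("score", 1)])])

def Spec_compareDatasets (setA : List (String × List (String × Int))) (setB : List (String × List (String × Int))) (out : List (String × List (String × Int))) : Prop := out = compareDatasets_alt setA setB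
instance (setA : List (String × List (String × Int))) (setB : List (String × List (String × Int))) (out : List (String × List (String × Int))) : Decidable (Spec_compareDatasets setA setB out) := by unfold Spec_compareDatasets; infer_instance

-- ===== CLAIM (what is proved, stated in full; the proofs are below) =====
def Claim_equal_compareDatasets : Prop := ∀ (setA : List (String × List (String × Int))) (setB : List (String × List (String × Int))), Dom_compareDatasets setA setB → Pre_compareDatasets setA setB → Spec_compareDatasets setA setB (compareDatasets setA setB)

-- ===== LEMMAS AND PROOFS =====

-- generic upsert step: both of A's loops and B's merge are folds of this shape
def upstep {β Inner : Type} (u : Inner → β → Inner) (e : β → Inner)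
    (out : List (String × Inner)) (p : String × β) : List (String × Inner) :=
  if (out.map Prod.fst).contains p.1 then
    out.map (fun q => if q.1 = p.1 then (q.1, u q.2 p.2) else q)
  else out ++ [(p.1, e p.2)]

theorem alook_cons {β : Type} (h : String × β) (t : List (String × β)) (k : String) :
    alook (h :: t) k = if h.1 = k then some h.2 else alook t k := rfl

theorem alook_eq_some_of_mem {β : Type} {l : List (String × β)} {q : String × β}
    (hnd : (l.map Prod.fst).Nodup) (hm : q ∈ l) : alook l q.1 = some q.2 := by
  induction l with
  | nil => cases hm
  | cons h t ih =>
    simp only [List.map_cons, List.nodup_cons] at hnd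
    rw [List.mem_cons] at hm
    rcases hm with he | hm
    · subst he; simp [alook]
    · have hne : h.1 ≠ q.1 := fun he => hnd.1 (he ▸ List.mem_map_of_mem hm)
      simp [alook, hne, ih hnd.2 hm]

theorem alook_eq_none_iff {β : Type} (l : List (String × β)) (k : String) :
    alook l k = none ↔ k ∉ l.map Prod.fst := by
  induction l with
  | nil => simp [alook]
  | cons h t ih =>
    by_cases he : h.1 = k
    · simp [alook, he]
    · simp only [alook, if_neg he, List.map_cons, List.mem_cons, ih]
      have hke : ¬ k = h.1 := fun hk => he hk.symm
      tauto

theorem contains_of_alook_some {β : Type} {l : List (String × β)} {k : String} {v : β}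
    (hv : alook l k = some v) : (l.map Prod.fst).contains k = true := by
  rw [List.contains_iff_mem]
  by_contra hn
  rw [(alook_eq_none_iff l k).mpr hn] at hv; cases hv

theorem contains_eq_false_of_alook_none {β : Type} {l : List (String × β)} {k : String}
    (hv : alook l k = none) : (l.map Prod.fst).contains k = false := by
  rw [← Bool.not_eq_true, List.contains_iff_mem]
  exact (alook_eq_none_iff l k).mp hv

-- the in-place overwrite keeps the key list unchanged
theorem keys_map_replace {β Inner : Type} (out : List (String × Inner)) (k : String)
    (u : Inner → β → Inner) (b : β) :
    ((out.map (fun q => if q.1 = k then (q.1, u q.2 b) else q)).map Prod.fst) =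
      out.map Prod.fst := by
  rw [List.map_map]
  refine List.map_congr_left (fun q _ => ?_)
  by_cases hq : q.1 = k <;> simp [hq]

theorem keys_upstep {β Inner : Type} (u : Inner → β → Inner) (e : β → Inner)
    (out : List (String × Inner)) (p : String × β) :
    (upstep u e out p).map Prod.fst =
      if (out.map Prod.fst).contains p.1 then out.map Prod.fst
      else out.map Prod.fst ++ [p.1] := by
  unfold upstep
  split_ifs with h
  · exact keys_map_replace out p.1 u p.2
  · simp

theorem nodup_keys_upstep {β Inner : Type} (u : Inner → β → Inner) (e : β → Inner)
    {out : List (String × Inner)} (p : String × β)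
    (h : (out.map Prod.fst).Nodup) : ((upstep u e out p).map Prod.fst).Nodup := by
  rw [keys_upstep]
  split_ifs with hc
  · exact h
  · have hp : p.1 ∉ out.map Prod.fst := by
      intro hm
      exact hc (by rw [List.contains_iff_mem]; exact hm)
    rw [List.nodup_append]
    refine ⟨h, by simp, ?_⟩
    intro a ha b hbm
    rw [List.mem_singleton] at hbm
    exact fun he => hp ((hbm ▸ he) ▸ ha)

-- characterization of any upsert fold, given distinct keys on both sides
theorem foldl_upstep {β Inner : Type} (u : Inner → β → Inner) (e : β → Inner) :
    ∀ (bs : List (String × β)) (out : List (String × Inner)),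
    (bs.map Prod.fst).Nodup → (out.map Prod.fst).Nodup →
    bs.foldl (upstep u e) out =
      out.map (fun q => match alook bs q.1 with
        | some db => (q.1, u q.2 db)
        | none => q)
      ++ (bs.filter (fun b => !(out.map Prod.fst).contains b.1)).map (fun b => (b.1, e b.2)) := by
  intro bs
  induction bs with
  | nil => intro out _ _; simp [alook]
  | cons p t ih =>
    intro out hb ho
    simp only [List.map_cons, List.nodup_cons] at hb
    have hp1 : p.1 ∉ t.map Prod.fst := hb.1
    have halt : alook t p.1 = none := (alook_eq_none_iff t p.1).mpr hp1
    simp only [List.foldl_cons]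
    rw [ih _ hb.2 (nodup_keys_upstep u e p ho)]
    unfold upstep
    by_cases hc : (out.map Prod.fst).contains p.1 = true
    · rw [if_pos hc]
      rw [keys_map_replace out p.1 u p.2]
      refine congrArg₂ (· ++ ·) ?_ ?_
      · rw [List.map_map]
        refine List.map_congr_left (fun q _ => ?_)
        by_cases hqp : q.1 = p.1
        · simp only [Function.comp_apply, if_pos hqp]
          have h1 : alook t q.1 = none := by rw [hqp]; exact halt
          have h2 : alook (p :: t) q.1 = some p.2 := by
            rw [alook_cons, if_pos hqp.symm]
          simp [h1, h2]
        · simp only [Function.comp_apply, if_neg hqp]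
          have h2 : alook (p :: t) q.1 = alook t q.1 := by
            rw [alook_cons, if_neg (fun h : p.1 = q.1 => hqp h.symm)]
          rw [h2]
      · have : List.filter (fun b => !(out.map Prod.fst).contains b.1) (p :: t) =
            List.filter (fun b => !(out.map Prod.fst).contains b.1) t := by
          rw [List.filter_cons, hc]
          rfl
        rw [this]
    · rw [if_neg hc]
      rw [Bool.not_eq_true] at hc
      have hpo : p.1 ∉ out.map Prod.fst := fun hm =>
        absurd (hc ▸ List.contains_iff_mem.mpr hm) Bool.false_ne_true
      rw [List.map_append]
      have h1 : out.map (fun q => match alook t q.1 with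
          | some db => (q.1, u q.2 db) | none => q) =
          out.map (fun q => match alook (p :: t) q.1 with
          | some db => (q.1, u q.2 db) | none => q) := by
        refine List.map_congr_left (fun q hq => ?_)
        have hqp : q.1 ≠ p.1 := by
          intro he; exact hpo (he ▸ List.mem_map_of_mem hq)
        rw [alook_cons, if_neg (fun h : p.1 = q.1 => hqp h.symm)]
      have h2 : List.map (fun q => match alook t q.1 with
          | some db => (q.1, u q.2 db) | none => q) [(p.1, e p.2)] = [(p.1, e p.2)] := by
        simp [halt]
      have h3 : List.filter (fun b => !((out ++ [(p.1, e p.2)]).map Prod.fst).contains b.1) t =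
          List.filter (fun b => !(out.map Prod.fst).contains b.1) t := by
        refine List.filter_congr (fun b hbm => ?_)
        have hbp : b.1 ≠ p.1 := fun he => hp1 (he ▸ List.mem_map_of_mem hbm)
        rw [List.map_append, List.contains_append]
        have : ([(p.1, e p.2)].map Prod.fst).contains b.1 = false := by
          simp [hbp]
        rw [this, Bool.or_false]
      have h4 : List.filter (fun b => !(out.map Prod.fst).contains b.1) (p :: t) =
          p :: List.filter (fun b => !(out.map Prod.fst).contains b.1) t := by
        rw [List.filter_cons, hc]
        rfl
      rw [h1, h2, h3, h4]
      simp


-- A's try/except step is an upsert (under distinct keys the looked-up item is the stored one)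
theorem aStep_eq_upstep (out : List (String × List (String × Int))) (p : String × List (String × Int))
    (ho : (out.map Prod.fst).Nodup) :
    aStep out p = upstep (fun item db => aUpdate item (scoreOf db))
      (fun db => [("x", -1), ("y", scoreOf db), ("difference", -1)]) out p := by
  unfold aStep upstep
  cases hv : alook out p.1 with
  | none =>
    rw [contains_eq_false_of_alook_none hv]
    rfl
  | some item =>
    rw [contains_of_alook_some hv, if_pos rfl]
    refine List.map_congr_left (fun q hq => ?_)
    by_cases hqp : q.1 = p.1
    · rw [if_pos hqp, if_pos hqp]
      have hs : alook out q.1 = some q.2 := alook_eq_some_of_mem ho hq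
      rw [hqp, hv] at hs
      rw [Option.some_inj.mp hs]
    · rw [if_neg hqp, if_neg hqp]

theorem foldl_aStep (bs : List (String × List (String × Int)))
    (out : List (String × List (String × Int))) (ho : (out.map Prod.fst).Nodup) :
    bs.foldl aStep out = bs.foldl (upstep (fun item db => aUpdate item (scoreOf db))
      (fun db => [("x", -1), ("y", scoreOf db), ("difference", -1)])) out := by
  induction bs generalizing out with
  | nil => rfl
  | cons p t ih =>
    simp only [List.foldl_cons]
    rw [aStep_eq_upstep out p ho]
    exact ih _ (nodup_keys_upstep _ _ p ho)

theorem aUpdate_aEntry (a b : Int) :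
    aUpdate (aEntry a) b = [("x", a), ("y", b), ("difference", a - b)] := by
  simp [aUpdate, aEntry, dput, alook]

theorem bEntry_both (setA setB : List (String × List (String × Int))) (k : String)
    (da db : List (String × Int))
    (hinA : (setA.map Prod.fst).contains k = true)
    (hinB : (setB.map Prod.fst).contains k = true)
    (hxa : alook setA k = some da) (hv : alook setB k = some db) :
    bEntry setA setB k = [("x", scoreOf da), ("y", scoreOf db),
      ("difference", scoreOf da - scoreOf db)] := by
  unfold bEntry
  rw [hxa, hv, hinA, hinB]
  simp

theorem bEntry_aonly (setA setB : List (String × List (String × Int))) (k : String)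
    (da : List (String × Int))
    (hinA : (setA.map Prod.fst).contains k = true)
    (hninB : (setB.map Prod.fst).contains k = false)
    (hxa : alook setA k = some da) :
    bEntry setA setB k = [("x", scoreOf da), ("y", -1), ("difference", -1)] := by
  unfold bEntry
  rw [hxa, hinA, hninB]
  simp

theorem bEntry_bonly (setA setB : List (String × List (String × Int))) (k : String)
    (db : List (String × Int))
    (hninA : (setA.map Prod.fst).contains k = false)
    (hinB : (setB.map Prod.fst).contains k = true)
    (hv : alook setB k = some db) :
    bEntry setA setB k = [("x", -1), ("y", scoreOf db), ("difference", -1)] := by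
  unfold bEntry
  rw [hv, hninA, hinB]
  simp

-- ===== VERDICT (by name: the statement is the Claim_ definition above) =====
theorem compareDatasets_spec : Claim_equal_compareDatasets := by
  intro setA setB _ hpre
  obtain ⟨hA, hB, -, -⟩ := hpre
  unfold Spec_compareDatasets
  show compareDatasets setA setB = compareDatasets_alt setA setB
  have hfun1 : (fun (out : List (String × List (String × Int))) (p : String × List (String × Int)) =>
      dput out p.1 (aEntry (scoreOf p.2))) =
      upstep (fun _ db => aEntry (scoreOf db)) (fun db => aEntry (scoreOf db)) := by
    funext out p; rfl
  have hfun2 : (fun (d : List (String × List (String × Int))) (p : String × List (String × Int)) =>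
      dput d p.1 p.2) = upstep (fun _ db => db) (fun db => db) := by
    funext d p; rfl
  have hout1 : setA.foldl (fun out p => dput out p.1 (aEntry (scoreOf p.2))) [] =
      setA.map (fun b => (b.1, aEntry (scoreOf b.2))) := by
    rw [hfun1, foldl_upstep _ _ setA [] hA (by simp)]
    simp
  have hkeys1 : ((setA.map (fun b => (b.1, aEntry (scoreOf b.2)))).map Prod.fst) =
      setA.map Prod.fst := by
    rw [List.map_map]; rfl
  have hnd1 : ((setA.map (fun b => (b.1, aEntry (scoreOf b.2)))).map Prod.fst).Nodup := by
    rw [hkeys1]; exact hA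
  show setB.foldl aStep (setA.foldl (fun out p => dput out p.1 (aEntry (scoreOf p.2))) []) =
      (setB.foldl (fun d p => dput d p.1 p.2) setA).map (fun p => (p.1, bEntry setA setB p.1))
  rw [hout1, foldl_aStep setB _ hnd1, foldl_upstep _ _ setB _ hB hnd1, hkeys1,
    hfun2, foldl_upstep _ _ setB setA hB hA, List.map_append]
  refine congrArg₂ (· ++ ·) ?_ ?_
  · rw [List.map_map, List.map_map]
    refine List.map_congr_left (fun q hq => ?_)
    have hxa : alook setA q.1 = some q.2 := alook_eq_some_of_mem hA hq
    have hinA : (setA.map Prod.fst).contains q.1 = true := contains_of_alook_some hxa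
    cases hv : alook setB q.1 with
    | some db =>
      have hinB := contains_of_alook_some hv
      simp only [Function.comp_apply, hv]
      rw [aUpdate_aEntry, bEntry_both setA setB q.1 q.2 db hinA hinB hxa hv]
    | none =>
      have hninB : (setB.map Prod.fst).contains q.1 = false := contains_eq_false_of_alook_none hv
      simp only [Function.comp_apply, hv]
      rw [bEntry_aonly setA setB q.1 q.2 hinA hninB hxa]
      rfl
  · rw [List.map_map]
    refine List.map_congr_left (fun b hbm => ?_)
    rw [List.mem_filter] at hbm
    obtain ⟨hbB, hbp⟩ := hbm
    have hninA : (setA.map Prod.fst).contains b.1 = false := by simpa using hbp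
    have hlb : alook setB b.1 = some b.2 := alook_eq_some_of_mem hB hbB
    have hinB := contains_of_alook_some hlb
    rw [Function.comp_apply, bEntry_bonly setA setB b.1 b.2 hninA hinB hlb]
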